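-- pv_equiv track=rewrite | github.com/PrabhuKiran8790/Data-Structures-and-Algorithms | Python/find_all_duplicates.py | solve
-- ===== SOURCE A (Python) =====
-- def solve(nums):
--     # using set
--     set_list = set()
--     ans = []
--     for e in nums:
--         if e not in set_list:
--             set_list.add(e)
--         else:
--             ans.append(e)
--     return ans
-- ===== SOURCE B (Python) =====
-- def solve(nums):
--     nums = list(nums)
--     first = {}
--     for i, e in enumerate(nums):
--         if e not in first:
--             first[e] = i
--     return [nums[i] for i in range(len(nums)) if first.get(nums[i], -1) != i]
-- ===== Notes on version B (the rewrite author's own statement) =====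
-- stated objective: alternative
-- what changed: A streams once with an incrementally grown seen-set, appending an element when already seen; B first builds a dict mapping each value to its first-occurrence index, then filters the index range, keeping nums[i] exactly when i is not that first index.
import Mathlib
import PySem

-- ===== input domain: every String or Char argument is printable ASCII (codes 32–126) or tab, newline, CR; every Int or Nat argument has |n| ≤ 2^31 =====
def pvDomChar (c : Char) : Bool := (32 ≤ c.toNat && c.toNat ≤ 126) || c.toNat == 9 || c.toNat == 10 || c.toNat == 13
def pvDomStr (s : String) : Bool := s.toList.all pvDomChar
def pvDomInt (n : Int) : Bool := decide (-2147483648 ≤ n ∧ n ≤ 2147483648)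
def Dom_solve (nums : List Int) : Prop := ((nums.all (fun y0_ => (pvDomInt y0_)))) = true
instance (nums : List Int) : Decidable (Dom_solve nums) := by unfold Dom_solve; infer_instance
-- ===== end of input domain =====

-- B replaces A's incremental seen-set loop by a first-occurrence index table plus an
-- index-filtering pass (keep nums[i] exactly when i is not the first index of its value);
-- objective: alternative decomposition, same O(n) cost.

-- ===== PORT A =====
def solve (nums : List Int) : List Int :=
  (nums.foldl
      (fun (st : PySem.Set Int × List Int) e =>
        if !(PySem.Set.contains st.1 e) then (PySem.Set.add st.1 e, st.2)
        else (st.1, st.2 ++ [e]))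
      (PySem.Set.empty, [])).2

-- ===== PORT B =====
-- `first.get(nums[i], -1)` is Dict.getD with default -1 (the key is always present, so the
-- default is unreachable); `nums[i]` with i drawn from range(len(nums)) is pyGetD (in range).
def solve_alt (nums : List Int) : List Int :=
  let first : PySem.Dict Int Int :=
    (PySem.List.enumerate nums 0).foldl
      (fun d p => if !(PySem.Dict.contains d p.2) then PySem.Dict.insert d p.2 p.1 else d)
      PySem.Dict.empty
  ((PySem.List.pyRange 0 (PySem.List.len nums) 1).filter
      (fun i => PySem.Dict.getD first (PySem.List.pyGetD nums i 0) (-1) != i)).map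
    (fun i => PySem.List.pyGetD nums i 0)

-- ===== PRECONDITION & SPEC =====
def Spec_solve (nums : List Int) (out : List Int) : Prop := out = solve_alt nums
instance (nums : List Int) (out : List Int) : Decidable (Spec_solve nums out) := by unfold Spec_solve; infer_instance

-- ===== CLAIM (what is proved, stated in full; the proofs are below) =====
def Claim_equal_solve : Prop := ∀ (nums : List Int), Dom_solve nums → Spec_solve nums (solve nums)

-- ===== LEMMAS AND PROOFS =====

-- the first-occurrence dict that solve_alt's first loop builds
def firstD (l : List Int) : PySem.Dict Int Int :=
  (PySem.List.enumerate l 0).foldl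
    (fun d p => if !(PySem.Dict.contains d p.2) then PySem.Dict.insert d p.2 p.1 else d)
    PySem.Dict.empty

theorem solve_alt_eq (l : List Int) :
    solve_alt l =
      ((PySem.List.pyRange 0 (PySem.List.len l) 1).filter
          (fun i => PySem.Dict.getD (firstD l) (PySem.List.pyGetD l i 0) (-1) != i)).map
        (fun i => PySem.List.pyGetD l i 0) := rfl

theorem firstD_append (l : List Int) (x : Int) :
    firstD (l ++ [x]) =
      if !(PySem.Dict.contains (firstD l) x)
      then PySem.Dict.insert (firstD l) x (l.length : Int)
      else firstD l := by
  unfold firstD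
  rw [PySem.List.enumerate_append, List.foldl_append]
  simp [PySem.List.enumerate_cons, PySem.List.enumerate_nil]

theorem contains_firstD (l : List Int) (y : Int) :
    PySem.Dict.contains (firstD l) y = true ↔ y ∈ l := by
  induction l using List.reverseRecOn generalizing y with
  | nil => simp [firstD, PySem.List.enumerate_nil, PySem.Dict.contains_empty]
  | append_singleton l x ih =>
    rw [firstD_append]
    by_cases hc : PySem.Dict.contains (firstD l) x = true
    · have hx : x ∈ l := (ih x).mp hc
      simp only [hc, Bool.not_true, Bool.false_eq_true, if_false, List.mem_append,
        List.mem_singleton, ih y]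
      constructor
      · exact Or.inl
      · rintro (h | rfl) <;> [exact h; exact hx]
    · simp only [Bool.not_eq_true] at hc
      simp only [hc, Bool.not_false, if_true, PySem.Dict.contains_insert,
        Bool.or_eq_true, beq_iff_eq, ih y, List.mem_append, List.mem_singleton]
      tauto

theorem getD_firstD_lt (l : List Int) (y : Int) :
    PySem.Dict.contains (firstD l) y = true →
    PySem.Dict.getD (firstD l) y (-1) < (l.length : Int) := by
  induction l using List.reverseRecOn generalizing y with
  | nil =>
    intro h
    rw [contains_firstD] at h
    simp at h
  | append_singleton l x ih =>
    intro h
    rw [firstD_append] at h ⊢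
    by_cases hc : PySem.Dict.contains (firstD l) x = true
    · simp only [hc, Bool.not_true, Bool.false_eq_true, if_false] at h ⊢
      have := ih y h
      simp only [List.length_append, List.length_singleton]
      push_cast
      omega
    · simp only [Bool.not_eq_true] at hc
      simp only [hc, Bool.not_false, if_true] at h ⊢
      by_cases hyx : y = x
      · subst hyx
        rw [PySem.Dict.getD_insert_self]
        simp only [List.length_append, List.length_singleton]
        push_cast
        omega
      · rw [PySem.Dict.getD_insert_of_ne _ _ _ hyx]
        rw [PySem.Dict.contains_insert] at h
        simp only [Bool.or_eq_true, beq_iff_eq] at h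
        rcases h with h | h
        · exact absurd h hyx
        · have := ih y h
          simp only [List.length_append, List.length_singleton]
          push_cast
          omega

-- A's set accumulator holds exactly the elements processed so far
theorem fst_foldl_mem (l : List Int) (s : PySem.Set Int) (acc : List Int) (y : Int) :
    y ∈ (l.foldl
      (fun (st : PySem.Set Int × List Int) e =>
        if !(PySem.Set.contains st.1 e) then (PySem.Set.add st.1 e, st.2)
        else (st.1, st.2 ++ [e])) (s, acc)).1 ↔ y ∈ s ∨ y ∈ l := by
  induction l generalizing s acc with
  | nil => simp
  | cons e t ih =>
    simp only [List.foldl_cons]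
    by_cases hc : PySem.Set.contains s e = true
    · have he : e ∈ s := (PySem.Set.contains_iff s e).mp hc
      simp only [hc, Bool.not_true, Bool.false_eq_true, if_false, ih,
        List.mem_cons]
      constructor
      · rintro (h | h) <;> tauto
      · rintro (h | rfl | h) <;> tauto
    · simp only [Bool.not_eq_true] at hc
      simp only [hc, Bool.not_false, if_true, ih, PySem.Set.mem_add,
        List.mem_cons]
      tauto

theorem solve_append (l : List Int) (x : Int) :
    solve (l ++ [x]) = solve l ++ (if x ∈ l then [x] else []) := by
  unfold solve
  rw [List.foldl_append, List.foldl_cons, List.foldl_nil]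
  by_cases hx : x ∈ l
  · have hc : PySem.Set.contains
        ((l.foldl
          (fun (st : PySem.Set Int × List Int) e =>
            if !(PySem.Set.contains st.1 e) then (PySem.Set.add st.1 e, st.2)
            else (st.1, st.2 ++ [e])) (PySem.Set.empty, [])).1) x = true := by
      rw [PySem.Set.contains_iff, fst_foldl_mem]
      exact Or.inr hx
    rw [if_pos hx]
    simp only [hc, Bool.not_true, Bool.false_eq_true, if_false]
  · have hc : PySem.Set.contains
        ((l.foldl
          (fun (st : PySem.Set Int × List Int) e =>
            if !(PySem.Set.contains st.1 e) then (PySem.Set.add st.1 e, st.2)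
            else (st.1, st.2 ++ [e])) (PySem.Set.empty, [])).1) x = false := by
      rw [Bool.eq_false_iff, Ne, PySem.Set.contains_iff, fst_foldl_mem]
      simp [PySem.Set.empty, hx]
    rw [if_neg hx]
    simp only [hc, Bool.not_false, if_true, List.append_nil]

theorem solve_alt_append (l : List Int) (x : Int) :
    solve_alt (l ++ [x]) = solve_alt l ++ (if x ∈ l then [x] else []) := by
  rw [solve_alt_eq, solve_alt_eq]
  have hlen : PySem.List.len (l ++ [x]) = PySem.List.len l + 1 := by
    simp [PySem.List.len_eq]
  have hlen2 : PySem.List.len l = (l.length : Int) := by simp [PySem.List.len_eq]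
  rw [hlen, hlen2, PySem.List.pyRange_one_succ_right (by positivity),
    List.filter_append, List.map_append]
  have hget : ∀ i : Int, 0 ≤ i → i < (l.length : Int) →
      PySem.List.pyGetD (l ++ [x]) i 0 = PySem.List.pyGetD l i 0 := by
    intro i h0 h1
    rw [PySem.List.pyGetD_eq_getElem _ _ h0 (by simp; omega),
      PySem.List.pyGetD_eq_getElem _ _ h0 h1,
      List.getElem_append_left (by omega)]
  have hgetl : PySem.List.pyGetD (l ++ [x]) (l.length : Int) 0 = x := by
    rw [PySem.List.pyGetD_eq_getElem _ _ (by positivity) (by simp)]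
    simp
  have hdict : ∀ i : Int, 0 ≤ i → i < (l.length : Int) →
      PySem.Dict.getD (firstD (l ++ [x])) (PySem.List.pyGetD l i 0) (-1)
        = PySem.Dict.getD (firstD l) (PySem.List.pyGetD l i 0) (-1) := by
    intro i h0 h1
    rw [firstD_append]
    by_cases hc : PySem.Dict.contains (firstD l) x = true
    · simp [hc]
    · simp only [Bool.not_eq_true] at hc
      simp only [hc, Bool.not_false, if_true]
      have hvx : PySem.List.pyGetD l i 0 ≠ x := by
        intro hEq
        have hv : PySem.List.pyGetD l i 0 ∈ l :=
          PySem.List.pyGetD_mem l 0 ⟨by omega, h1⟩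
        rw [hEq] at hv
        exact absurd ((contains_firstD l x).mpr hv) (by simp [hc])
      exact PySem.Dict.getD_insert_of_ne _ _ _ hvx
  have hpre : ∀ i ∈ PySem.List.pyRange 0 (l.length : Int) 1,
      0 ≤ i ∧ i < (l.length : Int) := by
    intro i hi
    exact PySem.List.mem_pyRange_one.mp hi
  congr 1
  · rw [List.filter_congr (fun i hi => by
      obtain ⟨h0, h1⟩ := hpre i hi
      rw [hget i h0 h1, hdict i h0 h1])]
    exact List.map_congr_left (fun i hi => by
      obtain ⟨h0, h1⟩ := hpre i (List.mem_of_mem_filter hi)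
      exact hget i h0 h1)
  · simp only [List.filter_cons, List.filter_nil]
    rw [firstD_append]
    by_cases hx : x ∈ l
    · have hc : PySem.Dict.contains (firstD l) x = true := (contains_firstD l x).mpr hx
      have hlt := getD_firstD_lt l x hc
      simp only [hc, Bool.not_true, Bool.false_eq_true, if_false, hgetl]
      have : (PySem.Dict.getD (firstD l) x (-1) != (l.length : Int)) = true := by
        simp only [bne_iff_ne, ne_eq]
        omega
      simp [this, hx, hgetl]
    · have hc : PySem.Dict.contains (firstD l) x = false := by
        rw [Bool.eq_false_iff, Ne, contains_firstD]
        exact hx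
      simp only [hc, Bool.not_false, if_true, hgetl, PySem.Dict.getD_insert_self]
      simp [hx]

theorem solve_eq_alt (nums : List Int) : solve nums = solve_alt nums := by
  induction nums using List.reverseRecOn with
  | nil => rfl
  | append_singleton l x ih => rw [solve_append, solve_alt_append, ih]

-- ===== VERDICT (by name: the statement is the Claim_ definition above) =====
theorem solve_spec : Claim_equal_solve := by
  intro nums _
  unfold Spec_solve
  exact solve_eq_alt nums
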